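-- pv_equiv track=rewrite | github.com/Rowson3D/Steps-Counter | step_calculator.py | find_epochs_factor
-- ===== SOURCE A (Python) =====
-- def find_epochs_factor(value, min_range, max_range, min_result=0, prioritize=None):
--     """
--     Finds a factor for epochs such that (value * factor) is within the given range.
--
--     Args:
--         value (int): The value to multiply.
--         min_range (int): The minimum value of the range.
--         max_range (int): The maximum value of the range.
--         min_result(int): Minimum result that needs to be met.
--         prioritize (str or None): If epochs or repeats should be prioritized.
--     Returns:
--         int or None: The found factor, or None if no factor is found.
--     """
--     if prioritize == "epochs":
--          for i in reversed(range(1, 1001)): #From high to low to find highest value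
--             result = value * i
--             if min_range <= result <= max_range and result >= min_result:
--                 return i
--     elif prioritize == "repeats":
--           for i in range(1, 1001): #From low to high to find smallest value
--             result = value * i
--             if min_range <= result <= max_range and result >= min_result:
--                 return i
--     else:
--       for i in range(1, 1001): #Normal value.
--             result = value * i
--             if min_range <= result <= max_range and result >= min_result:
--                 return i
--     return None
-- ===== SOURCE B (Python) =====
-- def find_epochs_factor(value, min_range, max_range, min_result=0, prioritize=None):
--     # Closed form (no scan): the feasible factors form an integer interval; pick its
--     # max for prioritize=='epochs', else its min. No 1000-step scan.
--     lo = max(min_range, min_result)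
--     hi = max_range
--     if value > 0:
--         L, U = -((-lo) // value), hi // value
--     elif value < 0:
--         L, U = -((-hi) // value), lo // value
--     else:
--         if lo <= 0 <= hi:
--             return 1000 if prioritize == "epochs" else 1
--         return None
--     L, U = max(L, 1), min(U, 1000)
--     if L > U:
--         return None
--     return U if prioritize == "epochs" else L
-- ===== Notes on version B (the rewrite author's own statement) =====
-- stated objective: alternative
-- what changed: Replaces the up-to-1000-iteration linear scan over candidate factors by a closed-form computation of the feasible factor interval via floor/ceil division, returning its max or min endpoint directly.
import Mathlib
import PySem

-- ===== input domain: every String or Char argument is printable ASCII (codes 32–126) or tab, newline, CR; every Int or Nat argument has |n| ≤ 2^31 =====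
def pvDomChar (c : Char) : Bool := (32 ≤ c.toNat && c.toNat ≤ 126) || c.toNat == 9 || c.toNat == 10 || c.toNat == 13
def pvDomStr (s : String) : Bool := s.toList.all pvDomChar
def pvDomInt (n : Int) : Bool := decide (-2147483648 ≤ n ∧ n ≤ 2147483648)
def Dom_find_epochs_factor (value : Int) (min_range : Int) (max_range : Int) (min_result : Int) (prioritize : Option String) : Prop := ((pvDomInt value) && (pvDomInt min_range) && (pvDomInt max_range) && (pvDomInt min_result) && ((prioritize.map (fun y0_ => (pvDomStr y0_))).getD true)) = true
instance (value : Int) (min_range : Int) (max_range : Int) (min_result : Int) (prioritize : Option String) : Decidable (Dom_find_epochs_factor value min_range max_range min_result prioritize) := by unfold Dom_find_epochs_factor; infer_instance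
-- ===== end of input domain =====

-- B replaces A's up-to-1000-step scan for the first/last feasible factor by a
-- closed-form computation of the feasible interval (objective: alternative, loop-free).

-- ===== PORT A =====
-- the loop body's test, shared by all three branches of A
def pvCond_find_epochs_factor (value : Int) (min_range : Int) (max_range : Int) (min_result : Int) (i : Int) : Bool :=
  decide (min_range ≤ value * i ∧ value * i ≤ max_range ∧ min_result ≤ value * i)

def find_epochs_factor (value : Int) (min_range : Int) (max_range : Int) (min_result : Int) (prioritize : Option String) : Option Int :=
  if prioritize = some "epochs" then
    ((PySem.List.pyRange 1 1001 1).reverse).find? (pvCond_find_epochs_factor value min_range max_range min_result)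
  else if prioritize = some "repeats" then
    (PySem.List.pyRange 1 1001 1).find? (pvCond_find_epochs_factor value min_range max_range min_result)
  else
    (PySem.List.pyRange 1 1001 1).find? (pvCond_find_epochs_factor value min_range max_range min_result)

-- ===== PORT B =====
def find_epochs_factor_alt (value : Int) (min_range : Int) (max_range : Int) (min_result : Int) (prioritize : Option String) : Option Int :=
  let lo := max min_range min_result
  let hi := max_range
  if value > 0 then
    let L := max (-(PySem.Int.floordiv (-lo) value)) 1
    let U := min (PySem.Int.floordiv hi value) 1000
    if L > U then none
    else if prioritize = some "epochs" then some U else some L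
  else if value < 0 then
    let L := max (-(PySem.Int.floordiv (-hi) value)) 1
    let U := min (PySem.Int.floordiv lo value) 1000
    if L > U then none
    else if prioritize = some "epochs" then some U else some L
  else
    if lo ≤ 0 ∧ 0 ≤ hi then
      (if prioritize = some "epochs" then some 1000 else some 1)
    else none

-- ===== PRECONDITION & SPEC =====
def Spec_find_epochs_factor (value : Int) (min_range : Int) (max_range : Int) (min_result : Int) (prioritize : Option String) (out : Option Int) : Prop := out = find_epochs_factor_alt value min_range max_range min_result prioritize
instance (value : Int) (min_range : Int) (max_range : Int) (min_result : Int) (prioritize : Option String) (out : Option Int) : Decidable (Spec_find_epochs_factor value min_range max_range min_result prioritize out) := by unfold Spec_find_epochs_factor; infer_instance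

-- ===== CLAIM (what is proved, stated in full; the proofs are below) =====
def Claim_equal_find_epochs_factor : Prop := ∀ (value : Int) (min_range : Int) (max_range : Int) (min_result : Int) (prioritize : Option String), Dom_find_epochs_factor value min_range max_range min_result prioritize → Spec_find_epochs_factor value min_range max_range min_result prioritize (find_epochs_factor value min_range max_range min_result prioritize)

-- ===== LEMMAS AND PROOFS =====

-- first hit of an interval predicate when scanning a range upward
theorem pvFindFwd (p : Int → Bool) (L U : Int) :
    ∀ (n : Nat) (a : Int), (∀ i, a ≤ i → i < a + n → p i = decide (L ≤ i ∧ i ≤ U)) →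
      (PySem.List.pyRange a (a + n) 1).find? p =
        if max L a ≤ min U (a + n - 1) then some (max L a) else none := by
  intro n
  induction n with
  | zero =>
    intro a hp
    simp only [Nat.cast_zero, add_zero]
    rw [if_neg (by omega)]
    simp [PySem.List.pyRange]
  | succ n ih =>
    intro a hp
    rw [PySem.List.pyRange_one_cons (by omega)]
    by_cases hA : L ≤ a ∧ a ≤ U
    · rw [List.find?_cons_of_pos (by rw [hp a (le_refl a) (by omega)]; exact decide_eq_true hA)]
      rw [if_pos (by omega)]
      congr 1
      omega
    · rw [List.find?_cons_of_neg (by rw [hp a (le_refl a) (by omega)]; simp only [decide_eq_true_eq]; exact hA)]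
      have hrec := ih (a + 1) (fun i h1 h2 => hp i (by omega) (by omega))
      have harr : a + 1 + (n : Int) = a + ((n : Nat) + 1 : Nat) := by push_cast; omega
      rw [harr] at hrec
      rw [hrec]
      rcases not_and_or.mp hA with h | h
      · push_neg at h
        rw [show max L (a + 1) = max L a from by omega]
      · push_neg at h
        rw [if_neg (by omega), if_neg (by omega)]

-- first hit of an interval predicate when scanning a range downward
theorem pvFindRev (p : Int → Bool) (L U : Int) :
    ∀ (n : Nat) (a : Int), (∀ i, a ≤ i → i < a + n → p i = decide (L ≤ i ∧ i ≤ U)) →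
      ((PySem.List.pyRange a (a + n) 1).reverse).find? p =
        if max L a ≤ min U (a + n - 1) then some (min U (a + n - 1)) else none := by
  intro n
  induction n with
  | zero =>
    intro a hp
    simp only [Nat.cast_zero, add_zero]
    rw [if_neg (by omega)]
    simp [PySem.List.pyRange]
  | succ n ih =>
    intro a hp
    have hb : a + ((n : Nat) + 1 : Nat) = (a + (n : Int)) + 1 := by push_cast; omega
    rw [hb, PySem.List.pyRange_one_succ_right (by omega)]
    rw [List.reverse_append, List.reverse_singleton, List.singleton_append]
    by_cases hA : L ≤ a + (n : Int) ∧ a + (n : Int) ≤ U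
    · rw [List.find?_cons_of_pos (by rw [hp (a + n) (by omega) (by omega)]; exact decide_eq_true hA)]
      rw [if_pos (by omega)]
      congr 1
      omega
    · rw [List.find?_cons_of_neg (by rw [hp (a + n) (by omega) (by omega)]; simp only [decide_eq_true_eq]; exact hA)]
      rw [ih a (fun i h1 h2 => hp i h1 (by omega))]
      rcases not_and_or.mp hA with h | h
      · push_neg at h
        rw [if_neg (by omega), if_neg (by omega)]
      · push_neg at h
        rw [show min U (a + (n : Int) - 1) = min U (a + (n : Int) + 1 - 1) from by omega]

-- ceiling bracket: -((-a) // v) ≤ i ↔ a ≤ v*i  (v > 0)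
theorem pvCeilLe (v a i : Int) (hv : 0 < v) :
    (-(PySem.Int.floordiv (-a) v) ≤ i) ↔ a ≤ v * i := by
  rw [neg_le, PySem.Int.le_floordiv_iff_mul_le hv, neg_mul, neg_le_neg_iff, mul_comm]

-- floor bracket: i ≤ a // v ↔ v*i ≤ a  (v > 0)
theorem pvLeFloor (v a i : Int) (hv : 0 < v) :
    (i ≤ PySem.Int.floordiv a v) ↔ v * i ≤ a := by
  rw [PySem.Int.le_floordiv_iff_mul_le hv, mul_comm]

-- ===== VERDICT (by name: the statement is the Claim_ definition above) =====
theorem find_epochs_factor_spec : Claim_equal_find_epochs_factor := by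
  intro v mn mx mr p _
  unfold Spec_find_epochs_factor find_epochs_factor find_epochs_factor_alt
  dsimp only
  set lo := max mn mr with hlo
  have hm1 : mn ≤ lo := by rw [hlo]; exact le_max_left mn mr
  have hm2 : mr ≤ lo := by rw [hlo]; exact le_max_right mn mr
  have hm3 : lo = mn ∨ lo = mr := by rw [hlo]; exact max_choice mn mr
  rcases lt_trichotomy v 0 with hv | hv | hv
  · -- v < 0
    have hw : 0 < -v := by omega
    have hp : ∀ i : Int, (1 : Int) ≤ i → i < 1 + ((1000 : Nat) : Int) →
        pvCond_find_epochs_factor v mn mx mr i =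
          decide ((-(PySem.Int.floordiv (-mx) v)) ≤ i ∧ i ≤ PySem.Int.floordiv lo v) := by
      intro i _ _
      unfold pvCond_find_epochs_factor
      have e1 := PySem.Int.floordiv_neg_neg mx (-v)
      rw [neg_neg] at e1
      have e2 := (PySem.Int.floordiv_neg_neg lo v).symm
      rw [e1, e2]
      apply decide_eq_decide.mpr
      have c1 := pvCeilLe (-v) (-mx) i hw
      rw [neg_neg] at c1
      have c2 := pvLeFloor (-v) (-lo) i hw
      rw [c1, c2]
      constructor
      · rintro ⟨h1, h2, h3⟩
        exact ⟨by linarith, by rcases hm3 with h | h <;> simp [h] <;> linarith⟩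
      · rintro ⟨h1, h2⟩
        exact ⟨by linarith, by linarith, by linarith⟩
    have hfwd := pvFindFwd (pvCond_find_epochs_factor v mn mx mr) _ _ 1000 1 hp
    have hrev := pvFindRev (pvCond_find_epochs_factor v mn mx mr) _ _ 1000 1 hp
    rw [show (1:Int) + ((1000:Nat):Int) - 1 = 1000 from by norm_num,
       show (1:Int) + ((1000:Nat):Int) = 1001 from by norm_num] at hfwd hrev
    by_cases hep : p = some "epochs"
    · rw [if_pos hep, hrev]
      split_ifs <;> first | rfl | omega | contradiction | (congr 1; omega)
    · rw [if_neg hep]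
      by_cases hrp : p = some "repeats"
      · rw [if_pos hrp, hfwd]
        split_ifs <;> first | rfl | omega | contradiction | (congr 1; omega)
      · rw [if_neg hrp, hfwd]
        split_ifs <;> first | rfl | omega | contradiction | (congr 1; omega)
  · -- v = 0
    subst hv
    by_cases hc : mn ≤ 0 ∧ 0 ≤ mx ∧ mr ≤ 0
    · have hp : ∀ i : Int, (1 : Int) ≤ i → i < 1 + ((1000 : Nat) : Int) →
          pvCond_find_epochs_factor 0 mn mx mr i = decide ((1 : Int) ≤ i ∧ i ≤ 1000) := by
        intro i h1 h2
        unfold pvCond_find_epochs_factor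
        simp only [zero_mul]
        rw [decide_eq_true hc, decide_eq_true (by omega)]
      have hfwd := pvFindFwd (pvCond_find_epochs_factor 0 mn mx mr) _ _ 1000 1 hp
      have hrev := pvFindRev (pvCond_find_epochs_factor 0 mn mx mr) _ _ 1000 1 hp
      rw [show (1:Int) + ((1000:Nat):Int) - 1 = 1000 from by norm_num,
       show (1:Int) + ((1000:Nat):Int) = 1001 from by norm_num] at hfwd hrev
      by_cases hep : p = some "epochs"
      · rw [if_pos hep, hrev]
        split_ifs <;> first | rfl | omega | contradiction | (congr 1; omega)
      · rw [if_neg hep]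
        by_cases hrp : p = some "repeats"
        · rw [if_pos hrp, hfwd]
          split_ifs <;> first | rfl | omega | contradiction | (congr 1; omega)
        · rw [if_neg hrp, hfwd]
          split_ifs <;> first | rfl | omega | contradiction | (congr 1; omega)
    · have hp : ∀ i : Int, (1 : Int) ≤ i → i < 1 + ((1000 : Nat) : Int) →
          pvCond_find_epochs_factor 0 mn mx mr i = decide ((1 : Int) ≤ i ∧ i ≤ 0) := by
        intro i h1 h2
        unfold pvCond_find_epochs_factor
        simp only [zero_mul]
        rw [decide_eq_false hc, decide_eq_false (by omega)]
      have hfwd := pvFindFwd (pvCond_find_epochs_factor 0 mn mx mr) _ _ 1000 1 hp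
      have hrev := pvFindRev (pvCond_find_epochs_factor 0 mn mx mr) _ _ 1000 1 hp
      rw [show (1:Int) + ((1000:Nat):Int) - 1 = 1000 from by norm_num,
       show (1:Int) + ((1000:Nat):Int) = 1001 from by norm_num] at hfwd hrev
      by_cases hep : p = some "epochs"
      · rw [if_pos hep, hrev]
        split_ifs <;> first | rfl | omega | contradiction | (congr 1; omega)
      · rw [if_neg hep]
        by_cases hrp : p = some "repeats"
        · rw [if_pos hrp, hfwd]
          split_ifs <;> first | rfl | omega | contradiction | (congr 1; omega)
        · rw [if_neg hrp, hfwd]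
          split_ifs <;> first | rfl | omega | contradiction | (congr 1; omega)
  · -- v > 0
    have hp : ∀ i : Int, (1 : Int) ≤ i → i < 1 + ((1000 : Nat) : Int) →
        pvCond_find_epochs_factor v mn mx mr i =
          decide ((-(PySem.Int.floordiv (-lo) v)) ≤ i ∧ i ≤ PySem.Int.floordiv mx v) := by
      intro i _ _
      unfold pvCond_find_epochs_factor
      apply decide_eq_decide.mpr
      rw [pvCeilLe v lo i hv, pvLeFloor v mx i hv]
      constructor
      · rintro ⟨h1, h2, h3⟩
        exact ⟨by rcases hm3 with h | h <;> simp [h] <;> linarith, h2⟩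
      · rintro ⟨h1, h2⟩
        exact ⟨by linarith, h2, by linarith⟩
    have hfwd := pvFindFwd (pvCond_find_epochs_factor v mn mx mr) _ _ 1000 1 hp
    have hrev := pvFindRev (pvCond_find_epochs_factor v mn mx mr) _ _ 1000 1 hp
    rw [show (1:Int) + ((1000:Nat):Int) - 1 = 1000 from by norm_num,
       show (1:Int) + ((1000:Nat):Int) = 1001 from by norm_num] at hfwd hrev
    by_cases hep : p = some "epochs"
    · rw [if_pos hep, hrev]
      split_ifs <;> first | rfl | omega | contradiction | (congr 1; omega)
    · rw [if_neg hep]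
      by_cases hrp : p = some "repeats"
      · rw [if_pos hrp, hfwd]
        split_ifs <;> first | rfl | omega | contradiction | (congr 1; omega)
      · rw [if_neg hrp, hfwd]
        split_ifs <;> first | rfl | omega | contradiction | (congr 1; omega)
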